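-- pv_equiv track=rewrite | github.com/Dynamic-Capital/Dynamic-Capital | ml/dhivehi_corpus_extractor.py | format_page_ranges
-- ===== SOURCE A (Python) =====
-- from typing import Dict, Iterable, Iterator, List, Mapping, Optional, Sequence, Set
--
-- def format_page_ranges(pages: Sequence[int]) -> List[str]:
--     """Format a sequence of page numbers into consolidated ranges."""
--
--     if not pages:
--         return []
--
--     sorted_pages = sorted(set(pages))
--     ranges: List[str] = []
--     range_start = sorted_pages[0]
--     previous = range_start
--
--     for page in sorted_pages[1:]:
--         if page == previous + 1:
--             previous = page
--             continue
--         ranges.append(_format_range(range_start, previous))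
--         range_start = page
--         previous = page
--
--     ranges.append(_format_range(range_start, previous))
--     return ranges
--
-- def _format_range(start: int, end: int) -> str:
--     return str(start) if start == end else f"{start}-{end}"
-- ===== SOURCE B (Python) =====
-- from itertools import groupby
-- from typing import List, Sequence
--
--
-- def format_page_ranges(pages: Sequence[int]) -> List[str]:
--     """Format a sequence of page numbers into consolidated ranges."""
--
--     if not pages:
--         return []
--
--     ranges: List[str] = []
--     for _, group in groupby(enumerate(sorted(set(pages))), key=lambda iv: iv[1] - iv[0]):
--         items = list(group)
--         ranges.append(_format_range(items[0][1], items[-1][1]))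
--     return ranges
--
--
-- def _format_range(start: int, end: int) -> str:
--     return str(start) if start == end else f"{start}-{end}"
-- ===== Notes on version B (the rewrite author's own statement) =====
-- stated objective: idiomatic
-- what changed: Replaces A's manual range_start/previous state machine over sorted(set(pages)) with itertools.groupby over enumerate(sorted(set(pages))) keyed on value-minus-index, so each maximal consecutive run is one group.
import Mathlib
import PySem

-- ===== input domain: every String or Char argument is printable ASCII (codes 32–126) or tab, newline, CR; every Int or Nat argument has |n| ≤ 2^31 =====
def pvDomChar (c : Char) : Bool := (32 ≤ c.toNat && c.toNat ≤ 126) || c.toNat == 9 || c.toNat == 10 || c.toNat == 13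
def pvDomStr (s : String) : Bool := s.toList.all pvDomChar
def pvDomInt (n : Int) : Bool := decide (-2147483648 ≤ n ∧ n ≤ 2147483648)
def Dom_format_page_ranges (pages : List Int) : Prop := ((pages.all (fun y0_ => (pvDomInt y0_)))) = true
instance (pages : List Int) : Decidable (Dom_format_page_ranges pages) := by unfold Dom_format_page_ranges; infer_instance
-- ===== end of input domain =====

-- B replaces A's manual range_start/previous state machine by itertools.groupby over
-- enumerate(sorted(set(pages))) keyed on value-minus-index (objective: idiomatic).

-- ===== PORT A =====
-- _format_range helper (shared source helper, used by both Pythons)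
def pvFormatRange (s e : Int) : String :=
  if s = e then PySem.Int.toStr s else PySem.Int.toStr s ++ "-" ++ PySem.Int.toStr e

-- A's for-loop over sorted_pages[1:] with state (ranges, range_start, previous)
def pvLoopA : List Int → List String → Int → Int → List String
  | [], ranges, rstart, prev => ranges ++ [pvFormatRange rstart prev]
  | p :: rest, ranges, rstart, prev =>
    if p = prev + 1 then pvLoopA rest ranges rstart p
    else pvLoopA rest (ranges ++ [pvFormatRange rstart prev]) p p

def format_page_ranges (pages : List Int) : List String :=
  if pages = [] then []
  else
    match PySem.List.sorted (PySem.Set.ofList pages) (fun x => x) false with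
    | [] => []  -- unreachable: pages ≠ [] so sorted(set(pages)) ≠ []
    | rs :: rest => pvLoopA rest [] rs rs

-- ===== PORT B =====
-- span of the current groupby group: consume while key iv.2 - iv.1 equals k
def pvSpan (k : Int) : List (Int × Int) → List (Int × Int) × List (Int × Int)
  | [] => ([], [])
  | a :: rest =>
    if a.2 - a.1 = k then
      let p := pvSpan k rest
      (a :: p.1, p.2)
    else ([], a :: rest)

theorem pvSpan_length (k : Int) (l : List (Int × Int)) : (pvSpan k l).2.length ≤ l.length := by
  induction l with
  | nil => simp [pvSpan]
  | cons a rest ih =>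
    simp only [pvSpan]
    split
    · exact Nat.le_succ_of_le ih
    · simp

-- itertools.groupby specialised to B's key iv[1] - iv[0]
def pvGroupby : List (Int × Int) → List (List (Int × Int))
  | [] => []
  | a :: rest =>
    (a :: (pvSpan (a.2 - a.1) rest).1) :: pvGroupby (pvSpan (a.2 - a.1) rest).2
termination_by l => l.length
decreasing_by
  exact Nat.lt_succ_of_le (pvSpan_length _ _)

-- items -> _format_range(items[0][1], items[-1][1]); groupby groups are nonempty, [] unreachable
def pvFmtGroup (items : List (Int × Int)) : String :=
  match items with
  | [] => ""
  | a :: t => pvFormatRange a.2 ((a :: t).getLastD a).2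

def format_page_ranges_alt (pages : List Int) : List String :=
  if pages = [] then []
  else
    (pvGroupby (PySem.List.enumerate
        (PySem.List.sorted (PySem.Set.ofList pages) (fun x => x) false) 0)).map pvFmtGroup

-- ===== PRECONDITION & SPEC =====
def Spec_format_page_ranges (pages : List Int) (out : List String) : Prop := out = format_page_ranges_alt pages
instance (pages : List Int) (out : List String) : Decidable (Spec_format_page_ranges pages out) := by unfold Spec_format_page_ranges; infer_instance

-- ===== CLAIM (what is proved, stated in full; the proofs are below) =====
def Claim_equal_format_page_ranges : Prop := ∀ (pages : List Int), Dom_format_page_ranges pages → Spec_format_page_ranges pages (format_page_ranges pages)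

-- ===== LEMMAS AND PROOFS =====

-- reference one-pass formulation both ports are reduced to
def pvRuns : Int → Int → List Int → List String
  | rstart, prev, [] => [pvFormatRange rstart prev]
  | rstart, prev, p :: rest =>
    if p = prev + 1 then pvRuns rstart p rest
    else pvFormatRange rstart prev :: pvRuns p p rest

def pvTakeRun : Int → List Int → List Int × List Int
  | _, [] => ([], [])
  | prev, p :: rest =>
    if p = prev + 1 then
      let q := pvTakeRun p rest
      (p :: q.1, q.2)
    else ([], p :: rest)

theorem pvLoopA_eq_runs (l : List Int) : ∀ (ranges : List String) (rstart prev : Int),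
    pvLoopA l ranges rstart prev = ranges ++ pvRuns rstart prev l := by
  induction l with
  | nil => intro ranges rstart prev; simp [pvLoopA, pvRuns]
  | cons p rest ih =>
    intro ranges rstart prev
    simp only [pvLoopA, pvRuns]
    split
    · exact ih ranges rstart p
    · rw [ih (ranges ++ [pvFormatRange rstart prev]) p p, List.append_assoc]
      rfl

theorem pvSpan_enumerate (l : List Int) : ∀ (i prev : Int),
    pvSpan (prev - i) (PySem.List.enumerate l (i + 1)) =
      (PySem.List.enumerate (pvTakeRun prev l).1 (i + 1),
       PySem.List.enumerate (pvTakeRun prev l).2 (i + 1 + (pvTakeRun prev l).1.length)) := by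
  induction l with
  | nil => intro i prev; simp [pvTakeRun, pvSpan, PySem.List.enumerate_nil]
  | cons p rest ih =>
    intro i prev
    rw [PySem.List.enumerate_cons]
    simp only [pvSpan, pvTakeRun]
    by_cases h : p = prev + 1
    · have hk : p - (i + 1) = prev - i := by omega
      rw [if_pos (by omega), if_pos h]
      have := ih (i + 1) p
      rw [hk] at this
      rw [this]
      simp [PySem.List.enumerate_cons]
      congr 1
      omega
    · rw [if_neg (by omega), if_neg h]
      simp [PySem.List.enumerate_cons]

theorem pvGetLastD_enumerate (l : List Int) : ∀ (s : Int) (d : Int × Int),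
    ((PySem.List.enumerate l s).getLastD d).2 = l.getLastD d.2 := by
  induction l with
  | nil => intro s d; simp [PySem.List.enumerate_nil]
  | cons x rest ih =>
    intro s d
    rw [PySem.List.enumerate_cons]
    rw [List.getLastD_cons, List.getLastD_cons]
    exact ih (s + 1) (s, x)

theorem pvRuns_eq_take (l : List Int) : ∀ (prev rstart : Int),
    pvRuns rstart prev l =
      pvFormatRange rstart ((pvTakeRun prev l).1.getLastD prev) ::
        (match (pvTakeRun prev l).2 with
         | [] => []
         | p :: r => pvRuns p p r) := by
  induction l with
  | nil => intro prev rstart; simp [pvRuns, pvTakeRun]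
  | cons p rest ih =>
    intro prev rstart
    simp only [pvRuns, pvTakeRun]
    by_cases h : p = prev + 1
    · rw [if_pos h, if_pos h]
      rw [ih p rstart]
      rw [List.getLastD_cons]
    · rw [if_neg h, if_neg h]
      simp

theorem pvTakeRun_length (l : List Int) : ∀ (prev : Int), (pvTakeRun prev l).2.length ≤ l.length := by
  induction l with
  | nil => intro prev; simp [pvTakeRun]
  | cons p rest ih =>
    intro prev
    simp only [pvTakeRun]
    split
    · exact Nat.le_succ_of_le (ih p)
    · simp

theorem pvGroupby_eq_runs (n : Nat) : ∀ (l : List Int), l.length ≤ n → ∀ (j rstart : Int),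
    (pvGroupby ((j, rstart) :: PySem.List.enumerate l (j + 1))).map pvFmtGroup =
      pvRuns rstart rstart l := by
  induction n with
  | zero =>
    intro l hl j rstart
    have : l = [] := List.length_eq_zero_iff.mp (Nat.le_zero.mp hl)
    subst this
    simp [pvGroupby, pvSpan, pvFmtGroup, pvRuns, PySem.List.enumerate_nil]
  | succ n ih =>
    intro l hl j rstart
    rw [pvGroupby]
    have hspan := pvSpan_enumerate l j rstart
    have hkey : ((j, rstart) : Int × Int).2 - ((j, rstart) : Int × Int).1 = rstart - j := rfl
    rw [hkey, hspan]
    rw [List.map_cons]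
    rw [pvRuns_eq_take l rstart rstart]
    congr 1
    · -- formatted head group
      simp only [pvFmtGroup, List.getLastD_cons]
      by_cases hr : (pvTakeRun rstart l).1 = []
      · rw [hr]; simp [PySem.List.enumerate_nil]
      · rw [pvGetLastD_enumerate]
    · -- remaining groups
      rcases hrest : (pvTakeRun rstart l).2 with _ | ⟨p, r⟩
      · simp [pvGroupby, PySem.List.enumerate_nil]
      · rw [PySem.List.enumerate_cons]
        have hlen : r.length ≤ n := by
          have := pvTakeRun_length l rstart
          rw [hrest] at this
          simp at this
          omega
        exact ih r hlen (j + 1 + ↑(pvTakeRun rstart l).1.length) p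

-- ===== VERDICT (by name: the statement is the Claim_ definition above) =====
theorem format_page_ranges_spec : Claim_equal_format_page_ranges := by
  intro pages _
  unfold Spec_format_page_ranges format_page_ranges format_page_ranges_alt
  by_cases hp : pages = []
  · simp [hp]
  · rw [if_neg hp, if_neg hp]
    rcases hs : PySem.List.sorted (PySem.Set.ofList pages) (fun x => x) false with _ | ⟨rs, rest⟩
    · exfalso
      have : PySem.Set.ofList pages = [] := (PySem.List.sorted_eq_nil_iff _ _ _).mp hs
      rcases pages with _ | ⟨q, qs⟩
      · exact hp rfl
      · have hq : q ∈ PySem.Set.ofList (q :: qs) := by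
          rw [PySem.Set.mem_ofList]; simp
        rw [this] at hq
        exact absurd hq (List.not_mem_nil)
    · rw [PySem.List.enumerate_cons]
      change pvLoopA rest [] rs rs = _
      rw [pvLoopA_eq_runs, List.nil_append]
      have := pvGroupby_eq_runs rest.length rest (le_refl _) 0 rs
      simpa using this.symm
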